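-- pv_equiv track=rewrite | github.com/anukrit21/ReviewRadar-See-the-Pulse-of-Opinions | ReviewRadar Project/app.py | _window_around
-- ===== SOURCE A (Python) =====
-- def _window_around(tokenized, target_words, radius=5):
--     indices = []
--     for i, tok in enumerate(tokenized):
--         for tw in target_words:
--             tw_tokens = tw.split()
--             if tw == tok or (" " in tw and tw == " ".join(tokenized[i:i+len(tw_tokens)])):
--                 indices.append((i, len(tw_tokens)))
--                 break
--     if not indices:
--         return " "
--     i, span = indices[0]
--     start = max(0, i - radius)
--     end = min(len(tokenized), i + span + radius)
--     return " ".join(tokenized[start:end])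
-- ===== SOURCE B (Python) =====
-- def _window_around(tokenized, target_words, radius=5):
--     n = len(tokenized)
--     best = None  # (first match index, span) of the best target so far
--     for tw in target_words:
--         tw_tokens = tw.split()
--         span = len(tw_tokens)
--         has_space = " " in tw
--         for j, tok in enumerate(tokenized):
--             if tw == tok or (has_space and tw == " ".join(tokenized[j:j+span])):
--                 if best is None or j < best[0]:
--                     best = (j, span)
--                 break
--     if best is None:
--         return " "
--     i, span = best
--     start = max(0, i - radius)
--     end = min(n, i + span + radius)
--     return " ".join(tokenized[start:end])
-- ===== Notes on version B (the rewrite author's own statement) =====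
-- stated objective: alternative
-- what changed: Loop nesting inverted: instead of scanning every position and collecting a match record for each (keeping only the first), B iterates the targets once, finds each target's first matching position (stopping that scan at the first hit), and keeps a running best (minimal index, strict-less update so ties keep the earlier target); no indices list is built.
import Mathlib
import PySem

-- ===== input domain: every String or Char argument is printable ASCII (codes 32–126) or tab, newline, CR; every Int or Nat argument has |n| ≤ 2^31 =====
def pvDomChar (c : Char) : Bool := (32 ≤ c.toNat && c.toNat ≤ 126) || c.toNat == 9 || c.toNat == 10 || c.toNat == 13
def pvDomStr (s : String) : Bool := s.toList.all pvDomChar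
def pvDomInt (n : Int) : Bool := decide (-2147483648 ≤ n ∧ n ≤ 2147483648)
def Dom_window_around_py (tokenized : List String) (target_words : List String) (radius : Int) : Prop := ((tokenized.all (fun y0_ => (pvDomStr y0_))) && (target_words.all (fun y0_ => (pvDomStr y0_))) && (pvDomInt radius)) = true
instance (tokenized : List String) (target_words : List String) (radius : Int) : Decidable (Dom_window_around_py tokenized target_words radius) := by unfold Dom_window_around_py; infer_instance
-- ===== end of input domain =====

-- B inverts the loop nesting (per-target first-match scan with a running best pair)
-- instead of A's per-position scan that collects a list of all match records; same
-- return value, objective: alternative decomposition.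

-- ===== PORT A =====
-- the shared match test: `tw == tok or (" " in tw and tw == " ".join(tokenized[i:i+len(tw.split())]))`
-- (literally this expression in both Pythons)
def pvCond (tokenized : List String) (tw : String) (i : Int) (tok : String) : Bool :=
  tw == tok ||
    (PySem.Str.isIn " " tw &&
      tw == PySem.Str.join " "
        (PySem.List.slice tokenized (some i) (some (i + ((PySem.Str.split₀ tw).length : Int)))))

def window_around_py (tokenized : List String) (target_words : List String) (radius : Int) : String :=
  -- indices = []; for i, tok in enumerate(tokenized): for tw ...: if cond: append; break
  let indices : List (Int × Int) :=
    (PySem.List.enumerate tokenized 0).foldl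
      (fun acc p =>
        match target_words.find? (fun tw => pvCond tokenized tw p.1 p.2) with
        | some tw => acc ++ [(p.1, ((PySem.Str.split₀ tw).length : Int))]
        | none => acc) []
  match indices with
  | [] => " "
  | (i, span) :: _ =>
      PySem.Str.join " "
        (PySem.List.slice tokenized (some (max 0 (i - radius)))
          (some (min (tokenized.length : Int) (i + span + radius))))

-- ===== PORT B =====
-- the loop body of B's outer `for tw in target_words` loop
def pvStepB (tokenized : List String) (best : Option (Int × Int)) (tw : String) : Option (Int × Int) :=
  let span : Int := (PySem.Str.split₀ tw).length
  match (PySem.List.enumerate tokenized 0).findSome?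
          (fun p => if pvCond tokenized tw p.1 p.2 then some p.1 else none) with
  | some j =>
      match best with
      | none => some (j, span)
      | some (i, sp) => if j < i then some (j, span) else some (i, sp)
  | none => best

def window_around_py_alt (tokenized : List String) (target_words : List String) (radius : Int) : String :=
  let n : Int := tokenized.length
  -- best = None; for tw in target_words: scan for tw's FIRST match (break), keep min index
  let best : Option (Int × Int) := target_words.foldl (pvStepB tokenized) none
  match best with
  | none => " "
  | some (i, span) =>
      PySem.Str.join " "
        (PySem.List.slice tokenized (some (max 0 (i - radius)))
          (some (min n (i + span + radius))))

-- ===== PRECONDITION & SPEC =====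
def Spec_window_around_py (tokenized : List String) (target_words : List String) (radius : Int) (out : String) : Prop := out = window_around_py_alt tokenized target_words radius
instance (tokenized : List String) (target_words : List String) (radius : Int) (out : String) : Decidable (Spec_window_around_py tokenized target_words radius out) := by unfold Spec_window_around_py; infer_instance

-- ===== CLAIM (what is proved, stated in full; the proofs are below) =====
def Claim_equal_window_around_py : Prop := ∀ (tokenized : List String) (target_words : List String) (radius : Int), Dom_window_around_py tokenized target_words radius → Spec_window_around_py tokenized target_words radius (window_around_py tokenized target_words radius)

-- ===== LEMMAS AND PROOFS =====

-- pvF: first index at which target tw matches (B's inner scan)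
def pvF (tokenized : List String) (E : List (Int × String)) (tw : String) : Option Int :=
  E.findSome? (fun p => if pvCond tokenized tw p.1 p.2 then some p.1 else none)

-- pvS: first position with any matching target, with that target's span (A's indices head)
def pvS (tokenized : List String) (E : List (Int × String)) (ts : List String) : Option (Int × Int) :=
  E.findSome? (fun p =>
    (ts.find? (fun tw => pvCond tokenized tw p.1 p.2)).map
      (fun tw => (p.1, ((PySem.Str.split₀ tw).length : Int))))

-- keep the record of smaller index; ties keep the LEFT (earlier) one
def pvComb : Option (Int × Int) → Option (Int × Int) → Option (Int × Int)
  | none, b => b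
  | some a, none => some a
  | some (i, sp), some (j, sp') => if j < i then some (j, sp') else some (i, sp)

theorem pvComb_none_left (b : Option (Int × Int)) : pvComb none b = b := rfl

theorem pvS_nil (tokenized : List String) (E : List (Int × String)) :
    pvS tokenized E [] = none := by
  induction E with
  | nil => rfl
  | cons p E ih =>
    simp only [pvS, List.findSome?, List.find?_nil, Option.map_none]
    exact ih

theorem pvS_mem (tokenized : List String) (E : List (Int × String)) (ts : List String)
    (j sp : Int) (h : pvS tokenized E ts = some (j, sp)) : ∃ p ∈ E, p.1 = j := by
  induction E with
  | nil => simp [pvS] at h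
  | cons p E ih =>
    simp only [pvS, List.findSome?] at h
    cases hf : (ts.find? (fun tw => pvCond tokenized tw p.1 p.2)) with
    | some tw => rw [hf] at h; simp at h; exact ⟨p, by simp, h.1⟩
    | none =>
      rw [hf] at h; simp only [Option.map_none] at h
      obtain ⟨q, hq, hq1⟩ := ih h
      exact ⟨q, by simp [hq], hq1⟩

theorem pvF_mem (tokenized : List String) (E : List (Int × String)) (tw : String)
    (j : Int) (h : pvF tokenized E tw = some j) : ∃ p ∈ E, p.1 = j := by
  induction E with
  | nil => simp [pvF] at h
  | cons p E ih =>
    simp only [pvF, List.findSome?] at h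
    by_cases hc : pvCond tokenized tw p.1 p.2
    · rw [if_pos hc] at h; simp at h; exact ⟨p, by simp, h⟩
    · rw [if_neg hc] at h
      obtain ⟨q, hq, hq1⟩ := ih h
      exact ⟨q, by simp [hq], hq1⟩

theorem pvComb_assoc (a b c : Option (Int × Int)) :
    pvComb (pvComb a b) c = pvComb a (pvComb b c) := by
  rcases a with _ | ⟨i, sp⟩ <;> rcases b with _ | ⟨j, sp'⟩ <;> rcases c with _ | ⟨k, sp''⟩ <;>
    simp only [pvComb] <;> split_ifs <;> first | rfl | omega | (simp only [pvComb]; split_ifs <;> first | rfl | omega)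

-- key lemma: pvS over (tw :: ts) decomposes into tw's first match combined with pvS ts,
-- provided E's indices are strictly increasing
theorem pvS_cons (tokenized : List String) (E : List (Int × String)) (tw : String)
    (ts : List String) (hE : E.Pairwise (fun p q => p.1 < q.1)) :
    pvS tokenized E (tw :: ts) =
      pvComb ((pvF tokenized E tw).map
          (fun j => (j, ((PySem.Str.split₀ tw).length : Int)))) (pvS tokenized E ts) := by
  induction E with
  | nil => rfl
  | cons p E ih =>
    have hlt : ∀ q ∈ E, p.1 < q.1 := (List.pairwise_cons.mp hE).1
    have hE' := (List.pairwise_cons.mp hE).2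
    by_cases hc : pvCond tokenized tw p.1 p.2
    · have hL : pvS tokenized (p :: E) (tw :: ts) = some (p.1, ((PySem.Str.split₀ tw).length : Int)) := by
        simp [pvS, List.findSome?, List.find?, hc]
      have hF : pvF tokenized (p :: E) tw = some p.1 := by
        simp [pvF, List.findSome?, hc]
      rw [hL, hF]
      cases hS : pvS tokenized (p :: E) ts with
      | none => rfl
      | some v =>
        obtain ⟨j, sp'⟩ := v
        obtain ⟨q, hq, hq1⟩ := pvS_mem tokenized (p :: E) ts j sp' hS
        have hnlt : ¬ j < p.1 := by
          rcases List.mem_cons.mp hq with h | h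
          · subst h; omega
          · have := hlt q h; omega
        simp only [Option.map_some, pvComb, if_neg hnlt]
    · have hfind : List.find? (fun tw' => pvCond tokenized tw' p.1 p.2) (tw :: ts) =
          List.find? (fun tw' => pvCond tokenized tw' p.1 p.2) ts := by
        simp [hc]
      have hF : pvF tokenized (p :: E) tw = pvF tokenized E tw := by
        simp [pvF, List.findSome?, hc]
      rw [hF]
      cases hd : List.find? (fun tw' => pvCond tokenized tw' p.1 p.2) ts with
      | some tu =>
        have hL : pvS tokenized (p :: E) (tw :: ts) = some (p.1, ((PySem.Str.split₀ tu).length : Int)) := by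
          simp [pvS, List.findSome?, hfind, hd]
        have hR : pvS tokenized (p :: E) ts = some (p.1, ((PySem.Str.split₀ tu).length : Int)) := by
          simp [pvS, List.findSome?, hd]
        rw [hL, hR]
        cases hFE : pvF tokenized E tw with
        | none => rfl
        | some j =>
          obtain ⟨q, hq, hq1⟩ := pvF_mem tokenized E tw j hFE
          have hjlt : p.1 < j := by have := hlt q hq; omega
          simp only [Option.map_some, pvComb, if_pos hjlt]
      | none =>
        have hL : pvS tokenized (p :: E) (tw :: ts) = pvS tokenized E (tw :: ts) := by
          simp [pvS, List.findSome?, hfind, hd]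
        have hR : pvS tokenized (p :: E) ts = pvS tokenized E ts := by
          simp [pvS, List.findSome?, hd]
        rw [hL, hR, ih hE']

-- B's fold step equals pvComb with the target's first-match record
theorem pvStep_eq (tokenized : List String) (best : Option (Int × Int)) (tw : String) :
    pvStepB tokenized best tw =
      pvComb best ((pvF tokenized (PySem.List.enumerate tokenized 0) tw).map
        (fun j => (j, ((PySem.Str.split₀ tw).length : Int)))) := by
  unfold pvStepB
  cases hF : pvF tokenized (PySem.List.enumerate tokenized 0) tw with
  | none => simp only [pvF] at hF; rw [hF]; cases best <;> rfl
  | some j =>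
    simp only [pvF] at hF; rw [hF]
    rcases best with _ | ⟨i, sp⟩ <;> simp only [Option.map_some, pvComb]

-- B's fold over the targets computes pvComb acc (pvS ...)
theorem pvFold_eq (tokenized : List String) (ts : List String) (acc : Option (Int × Int)) :
    ts.foldl (pvStepB tokenized) acc
      = pvComb acc (pvS tokenized (PySem.List.enumerate tokenized 0) ts) := by
  induction ts generalizing acc with
  | nil => rw [pvS_nil]; cases acc <;> rfl
  | cons tw ts ih =>
    rw [List.foldl_cons, ih, pvStep_eq, pvComb_assoc,
        ← pvS_cons tokenized (PySem.List.enumerate tokenized 0) tw ts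
          (PySem.List.pairwise_lt_enumerate tokenized 0)]

-- A's fold collecting match records is filterMap
theorem pvIndices_eq (tokenized : List String) (target_words : List String)
    (E : List (Int × String)) (acc : List (Int × Int)) :
    E.foldl
      (fun acc p =>
        match target_words.find? (fun tw => pvCond tokenized tw p.1 p.2) with
        | some tw => acc ++ [(p.1, ((PySem.Str.split₀ tw).length : Int))]
        | none => acc) acc
      = acc ++ E.filterMap (fun p =>
          (target_words.find? (fun tw => pvCond tokenized tw p.1 p.2)).map
            (fun tw => (p.1, ((PySem.Str.split₀ tw).length : Int)))) := by
  induction E generalizing acc with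
  | nil => simp
  | cons p E ih =>
    rw [List.foldl_cons, List.filterMap_cons]
    cases hf : target_words.find? (fun tw => pvCond tokenized tw p.1 p.2) with
    | some tw => simp only [Option.map_some]; rw [ih]; simp
    | none => simp only [Option.map_none]; exact ih acc

theorem pvHead_filterMap {α β : Type} (f : α → Option β) (l : List α) :
    (l.filterMap f).head? = l.findSome? f := by
  induction l with
  | nil => rfl
  | cons a l ih =>
    rw [List.filterMap_cons, List.findSome?]
    cases hf : f a with
    | some b => simp
    | none => exact ih

-- ===== VERDICT (by name: the statement is the Claim_ definition above) =====
theorem window_around_py_spec : Claim_equal_window_around_py := by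
  intro tokenized target_words radius _
  show window_around_py tokenized target_words radius = window_around_py_alt tokenized target_words radius
  unfold window_around_py window_around_py_alt
  rw [pvIndices_eq tokenized target_words (PySem.List.enumerate tokenized 0) [],
      pvFold_eq tokenized target_words none, pvComb_none_left, List.nil_append]
  have hhead := pvHead_filterMap
    (fun p : Int × String =>
      (target_words.find? (fun tw => pvCond tokenized tw p.1 p.2)).map
        (fun tw => (p.1, ((PySem.Str.split₀ tw).length : Int))))
    (PySem.List.enumerate tokenized 0)
  cases hS : pvS tokenized (PySem.List.enumerate tokenized 0) target_words with
  | none =>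
    have hnil : (PySem.List.enumerate tokenized 0).filterMap
        (fun p => (target_words.find? (fun tw => pvCond tokenized tw p.1 p.2)).map
          (fun tw => (p.1, ((PySem.Str.split₀ tw).length : Int)))) = [] := by
      rw [← List.head?_eq_none_iff, hhead]; exact hS
    rw [hnil]
  | some v =>
    obtain ⟨i, sp⟩ := v
    have hh : ((PySem.List.enumerate tokenized 0).filterMap
        (fun p => (target_words.find? (fun tw => pvCond tokenized tw p.1 p.2)).map
          (fun tw => (p.1, ((PySem.Str.split₀ tw).length : Int))))).head? = some (i, sp) := by
      rw [hhead]; simpa [pvS] using hS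
    cases hl : (PySem.List.enumerate tokenized 0).filterMap
        (fun p => (target_words.find? (fun tw => pvCond tokenized tw p.1 p.2)).map
          (fun tw => (p.1, ((PySem.Str.split₀ tw).length : Int)))) with
    | nil => rw [hl] at hh; simp at hh
    | cons hd tl =>
      rw [hl] at hh
      simp only [List.head?_cons, Option.some.injEq] at hh
      rw [hh]
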